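-- pv_equiv track=rewrite | github.com/habibTheCoel/habib-s_Base | pro2.py | kik
-- ===== SOURCE A (Python) =====
-- def kik(a , la) :
--
--     bi = []
--
--     for i in a :
--         c = 0
--         if i not in la :
--             la.append(i)
--             for k in a :
--                 if i == k :
--                     c += 1
--             bi.append(c)
--
--
--     return la,bi
-- ===== SOURCE B (Python) =====
-- # Build an order-preserving count table in one pass, then a single pass over its
-- # keys; same in-place mutation of la as the original.
-- def kik(a, la):
--     counts = {}
--     for i in a:
--         counts[i] = counts.get(i, 0) + 1
--     bi = []
--     for key, c in counts.items():
--         if key not in la: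
--             la.append(key)
--             bi.append(c)
--     return la, bi
-- ===== Notes on version B (the rewrite author's own statement) =====
-- stated objective: simpler
-- what changed: A rescans the whole input list to count every newly seen element (nested loops); B builds an insertion-ordered count dict in one pass and then does a single pass over its distinct keys, so the inner counting scan disappears.
import Mathlib
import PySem

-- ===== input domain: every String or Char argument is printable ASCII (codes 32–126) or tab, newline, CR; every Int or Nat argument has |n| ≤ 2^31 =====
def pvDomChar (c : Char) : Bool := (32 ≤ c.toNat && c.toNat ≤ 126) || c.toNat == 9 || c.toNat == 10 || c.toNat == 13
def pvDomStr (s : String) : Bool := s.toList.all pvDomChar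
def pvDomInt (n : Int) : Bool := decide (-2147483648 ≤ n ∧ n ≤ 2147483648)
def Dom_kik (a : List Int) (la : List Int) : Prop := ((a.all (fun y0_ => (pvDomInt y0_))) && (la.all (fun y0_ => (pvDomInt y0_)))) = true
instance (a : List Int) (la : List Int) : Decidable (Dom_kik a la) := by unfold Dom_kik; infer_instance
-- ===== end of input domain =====

-- One honest line: B replaces A's nested rescans with a one-pass count dict plus a
-- single pass over its distinct keys; both mutate the Python argument la in place
-- (the equivalence proved here is about the return value).

-- ===== PORT A =====
def kik (a : List Int) (la : List Int) : List Int × List Int :=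
  a.foldl
    (fun (st : List Int × List Int) i =>
      -- c = 0; if i not in la: la.append(i); for k in a: if i == k: c += 1; bi.append(c)
      let c : Int := 0
      if !(st.1.contains i) then
        let c := a.foldl (fun c k => if i == k then c + 1 else c) c
        (st.1 ++ [i], st.2 ++ [c])
      else st)
    (la, ([] : List Int))

-- ===== PORT B =====
def kik_alt (a : List Int) (la : List Int) : List Int × List Int :=
  -- counts = {}; for i in a: counts[i] = counts.get(i, 0) + 1
  let counts : PySem.Dict Int Int :=
    a.foldl (fun (d : PySem.Dict Int Int) i => d.insert i (d.getD i 0 + 1)) PySem.Dict.empty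
  -- for key, c in counts.items(): if key not in la: la.append(key); bi.append(c)
  counts.items.foldl
    (fun (st : List Int × List Int) kc =>
      if !(st.1.contains kc.1) then (st.1 ++ [kc.1], st.2 ++ [kc.2]) else st)
    (la, ([] : List Int))

-- ===== PRECONDITION & SPEC =====
def Spec_kik (a : List Int) (la : List Int) (out : List Int × List Int) : Prop := out = kik_alt a la
instance (a : List Int) (la : List Int) (out : List Int × List Int) : Decidable (Spec_kik a la out) := by unfold Spec_kik; infer_instance

-- ===== CLAIM (what is proved, stated in full; the proofs are below) =====
def Claim_equal_kik : Prop := ∀ (a : List Int) (la : List Int), Dom_kik a la → Spec_kik a la (kik a la)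

-- ===== LEMMAS AND PROOFS =====

-- the common step once the per-element count is known
def pvStep (a : List Int) (st : List Int × List Int) (x : Int) : List Int × List Int :=
  if !(st.1.contains x) then (st.1 ++ [x], st.2 ++ [(a.count x : Int)]) else st

-- A's fold is pvStep (inner counting loop = a.count i)
lemma kik_eq_fold (a la : List Int) :
    kik a la = a.foldl (pvStep a) (la, []) := by
  unfold kik pvStep
  congr 1
  funext st i
  simp only [PySem.List.foldl_ite_add_one, zero_add]
  have hc : List.countP (fun x => decide ((i == x) = true)) a = List.countP (fun x => x == i) a :=
    List.countP_congr (fun k _ => by cases h : (k == i) <;> simp_all; omega)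
  simp only [List.count_eq_countP, hc]

-- B's fold over the counter's items is pvStep over the deduplicated input
lemma kik_alt_eq_fold (a la : List Int) :
    kik_alt a la = (PySem.Set.ofList a).foldl (pvStep a) (la, []) := by
  have h : kik_alt a la = (PySem.Dict.counter a).items.foldl
      (fun (st : List Int × List Int) kc =>
        if !(st.1.contains kc.1) then (st.1 ++ [kc.1], st.2 ++ [kc.2]) else st)
      (la, []) := rfl
  rw [h, PySem.Dict.items_counter, List.foldl_map]
  rfl

-- skipping an element already (and permanently) in the accumulator's first list
lemma foldl_step_discard (a : List Int) (x : Int) :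
    ∀ (s : List Int) (l b : List Int), x ∈ l →
      (PySem.Set.discard s x).foldl (pvStep a) (l, b) = s.foldl (pvStep a) (l, b) := by
  intro s
  induction s with
  | nil => intro l b _; rfl
  | cons y ys ih =>
    intro l b hx
    by_cases hyx : y = x
    · subst hyx
      have h1 : PySem.Set.discard (y :: ys) y = PySem.Set.discard ys y := by
        simp [PySem.Set.discard]
      have h2 : pvStep a (l, b) y = (l, b) := by
        simp [pvStep, hx]
      rw [h1, ih l b hx, List.foldl_cons, h2]
    · have h1 : PySem.Set.discard (y :: ys) x = y :: PySem.Set.discard ys x := by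
        simp [PySem.Set.discard, hyx]
      rw [h1, List.foldl_cons, List.foldl_cons]
      rcases h : pvStep a (l, b) y with ⟨l', b'⟩
      have hl' : x ∈ l' := by
        unfold pvStep at h
        split at h
        · injection h with h1 h2; rw [← h1]; exact List.mem_append_left _ hx
        · injection h with h1 h2; rw [← h1]; exact hx
      exact ih l' b' hl'

-- folding pvStep over xs = folding it over the first occurrences only
lemma foldl_step_dedup (a : List Int) :
    ∀ (xs l b : List Int),
      xs.foldl (pvStep a) (l, b) = (PySem.Set.ofList xs).foldl (pvStep a) (l, b) := by
  intro xs
  induction xs with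
  | nil => intro l b; rfl
  | cons x xs ih =>
    intro l b
    rw [PySem.Set.ofList_cons, List.foldl_cons, List.foldl_cons]
    rcases h : pvStep a (l, b) x with ⟨l', b'⟩
    have hl' : x ∈ l' := by
      unfold pvStep at h
      split at h
      · injection h with h1 h2; rw [← h1]; exact List.mem_append_right _ (by simp)
      · injection h with h1 h2
        rw [← h1]
        rename_i hc
        simpa using hc
    rw [ih l' b', foldl_step_discard a x _ l' b' hl']

-- ===== VERDICT (by name: the statement is the Claim_ definition above) =====
theorem kik_spec : Claim_equal_kik := by
  intro a la _
  unfold Spec_kik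
  rw [kik_eq_fold, kik_alt_eq_fold, foldl_step_dedup]
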